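-- pv_equiv track=rewrite | github.com/3vinicius/Harvard-CS50-s-Introduction-to-Computer-Science | sentimental-readability/readability.py | countSetencesWordsLetters
-- ===== SOURCE A (Python) =====
-- def countSetencesWordsLetters(arrayWords):
--
--     setencesWordsLetters = [0,1,0]
--
--     for word in arrayWords:
--         for letter in word:
--             if (ord(letter) == 33 or ord(letter) == 46 or ord(letter) == 63):
--                 setencesWordsLetters[0] +=1
--
--             if (ord(letter) == 32):
--                 setencesWordsLetters[1] +=1
--
--             if ((ord(letter) > 64 and ord(letter) < 91) or (ord(letter) > 96 and ord(letter) < 123)):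
--                 setencesWordsLetters[2] +=1
--
--     return setencesWordsLetters
-- ===== SOURCE B (Python) =====
-- def countSetencesWordsLetters(arrayWords):
--     text = "".join(arrayWords)
--     sentences = text.count('!') + text.count('.') + text.count('?')
--     spaces = text.count(' ')
--     letters = sum(1 for c in text if ('A' <= c <= 'Z') or ('a' <= c <= 'z'))
--     return [sentences, spaces + 1, letters]
-- ===== Notes on version B (the rewrite author's own statement) =====
-- stated objective: idiomatic
-- what changed: Replaces the nested character loop mutating a 3-slot list with joining the words into one string and using str.count / a range-comparison sum to compute the three tallies directly.
import Mathlib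
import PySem

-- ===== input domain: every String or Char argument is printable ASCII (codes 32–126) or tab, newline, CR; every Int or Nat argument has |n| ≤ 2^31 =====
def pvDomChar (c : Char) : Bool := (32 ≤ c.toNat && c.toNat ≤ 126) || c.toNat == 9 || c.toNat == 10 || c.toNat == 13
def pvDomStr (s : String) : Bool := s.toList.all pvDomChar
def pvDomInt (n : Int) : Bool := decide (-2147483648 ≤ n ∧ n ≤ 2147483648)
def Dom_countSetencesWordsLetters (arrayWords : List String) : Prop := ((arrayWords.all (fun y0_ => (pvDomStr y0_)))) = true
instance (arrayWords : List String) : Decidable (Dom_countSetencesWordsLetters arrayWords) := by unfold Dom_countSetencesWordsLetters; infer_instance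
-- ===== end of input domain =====

-- B replaces A's nested per-character loop over a mutable 3-slot list by counting directly on the joined text (str.count / a filtered length); objective: idiomatic, not claimed faster.


-- ===== PORT A =====
-- step for one character of A's inner loop (the three-slot list as a triple of counters)
def pvAStep (st : Int × Int × Int) (letter : Char) : Int × Int × Int :=
  let st := if letter.toNat = 33 ∨ letter.toNat = 46 ∨ letter.toNat = 63 then (st.1 + 1, st.2.1, st.2.2) else st
  let st := if letter.toNat = 32 then (st.1, st.2.1 + 1, st.2.2) else st
  if (64 < letter.toNat ∧ letter.toNat < 91) ∨ (96 < letter.toNat ∧ letter.toNat < 123) then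
    (st.1, st.2.1, st.2.2 + 1) else st

def countSetencesWordsLetters (arrayWords : List String) : List Int :=
  let st := arrayWords.foldl (fun st word => word.toList.foldl pvAStep st) (0, 1, 0)
  [st.1, st.2.1, st.2.2]

-- ===== PORT B =====
def countSetencesWordsLetters_alt (arrayWords : List String) : List Int :=
  let text := (arrayWords.map String.toList).flatten
  let sentences : Int := text.count '!' + text.count '.' + text.count '?'
  let spaces : Int := text.count ' '
  let letters : Int := (text.filter (fun c => ('A' ≤ c ∧ c ≤ 'Z') ∨ ('a' ≤ c ∧ c ≤ 'z') : Char → Bool)).length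
  [sentences, spaces + 1, letters]

-- ===== PRECONDITION & SPEC =====
def Spec_countSetencesWordsLetters (arrayWords : List String) (out : List Int) : Prop := out = countSetencesWordsLetters_alt arrayWords
instance (arrayWords : List String) (out : List Int) : Decidable (Spec_countSetencesWordsLetters arrayWords out) := by unfold Spec_countSetencesWordsLetters; infer_instance

-- ===== CLAIM (what is proved, stated in full; the proofs are below) =====
def Claim_equal_countSetencesWordsLetters : Prop := ∀ (arrayWords : List String), Dom_countSetencesWordsLetters arrayWords → Spec_countSetencesWordsLetters arrayWords (countSetencesWordsLetters arrayWords)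

-- ===== LEMMAS AND PROOFS =====

-- ===== VERDICT (by name: the statement is the Claim_ definition above) =====
-- indicator form of one A-step
lemma pvAStep_eq (st : Int × Int × Int) (c : Char) :
    pvAStep st c =
      (st.1 + (if c = '!' ∨ c = '.' ∨ c = '?' then 1 else 0),
       st.2.1 + (if c = ' ' then 1 else 0),
       st.2.2 + (if (('A' ≤ c ∧ c ≤ 'Z') ∨ ('a' ≤ c ∧ c ≤ 'z') : Bool) then 1 else 0)) := by
  have e : ∀ d : Char, c.toNat = d.toNat ↔ c = d := by
    intro d
    simp only [Char.toNat, UInt32.toNat_inj, ← Char.ext_iff]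
  have h1 : (c.toNat = 33 ∨ c.toNat = 46 ∨ c.toNat = 63) ↔ (c = '!' ∨ c = '.' ∨ c = '?') := by
    rw [show (33:Nat) = '!'.toNat from rfl, show (46:Nat) = '.'.toNat from rfl,
        show (63:Nat) = '?'.toNat from rfl, e, e, e]
  have h2 : c.toNat = 32 ↔ c = ' ' := by
    rw [show (32:Nat) = ' '.toNat from rfl, e]
  have h3 : ((64 < c.toNat ∧ c.toNat < 91) ∨ (96 < c.toNat ∧ c.toNat < 123)) ↔
      ((('A' ≤ c ∧ c ≤ 'Z') ∨ ('a' ≤ c ∧ c ≤ 'z') : Bool) = true) := by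
    simp only [Bool.or_eq_true, Bool.and_eq_true, decide_eq_true_eq,
      Char.le_def, UInt32.le_iff_toNat_le, Char.toNat,
      show 'A'.val.toNat = 65 from rfl, show 'Z'.val.toNat = 90 from rfl,
      show 'a'.val.toNat = 97 from rfl, show 'z'.val.toNat = 122 from rfl]
    omega
  simp only [pvAStep, h1, h2, h3]
  split_ifs <;> simp_all

-- the inner fold adds the three counts of the character list to the state
lemma pvFold_eq (cs : List Char) (st : Int × Int × Int) :
    cs.foldl pvAStep st =
      (st.1 + ((cs.count '!' : Int) + cs.count '.' + cs.count '?'),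
       st.2.1 + (cs.count ' ' : Int),
       st.2.2 + ((cs.filter (fun c => ('A' ≤ c ∧ c ≤ 'Z') ∨ ('a' ≤ c ∧ c ≤ 'z') : Char → Bool)).length : Int)) := by
  induction cs generalizing st with
  | nil => simp
  | cons c cs ih =>
    simp only [List.foldl_cons, ih, pvAStep_eq]
    by_cases hb : (('A' ≤ c ∧ c ≤ 'Z') ∨ ('a' ≤ c ∧ c ≤ 'z') : Bool) = true <;>
      by_cases h1 : c = '!' <;> by_cases h2 : c = '.' <;> by_cases h3 : c = '?' <;>
      by_cases h4 : c = ' ' <;>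
      simp_all [List.count_cons, List.filter_cons] <;> push_cast <;> ring_nf <;> omega

-- the word-by-word fold equals the fold over the flattened character list
lemma pvFold_flatten (ws : List String) (st : Int × Int × Int) :
    ws.foldl (fun st word => word.toList.foldl pvAStep st) st =
      ((ws.map String.toList).flatten).foldl pvAStep st := by
  induction ws generalizing st with
  | nil => simp
  | cons w ws ih => simp [List.foldl_append, ih]

theorem countSetencesWordsLetters_spec : Claim_equal_countSetencesWordsLetters := by
  intro arrayWords _
  show countSetencesWordsLetters arrayWords = countSetencesWordsLetters_alt arrayWords
  rw [countSetencesWordsLetters, countSetencesWordsLetters_alt, pvFold_flatten, pvFold_eq]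
  simp [Int.add_comm]
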